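-- pv_equiv track=rewrite | github.com/y-xue/Exerices-in-Machine-Learning | Ex2-DecisionTree/old/modules/ID3-yiyi.py | check_homogenous
-- ===== SOURCE A (Python) =====
-- def check_homogenous(data_set):
--     '''
--     ========================================================================================================
--     Input:  A data_set
--     ========================================================================================================
--     Job:    Checks if the output value (index 0) is the same for all examples in the the data_set, if so return
--     that output value, otherwise return None.
--     ========================================================================================================
--     Output: Return either the homogenous attribute or None
--     ========================================================================================================
--      '''
--     # Your code here
--     if len(data_set) == 0:
--         return None
--     homo = data_set[0][0]
--     for item in data_set:
--         if item[0] != homo: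
--             return None
--     return homo
-- ===== SOURCE B (Python) =====
-- def check_homogenous(data_set):
--     labels = {row[0] for row in data_set}
--     if len(labels) == 1:
--         return next(iter(labels))
--     return None
-- ===== Notes on version B (the rewrite author's own statement) =====
-- stated objective: idiomatic
-- what changed: Replaces the running-reference early-exit scan with a set comprehension collecting all distinct first-column labels, then a cardinality check returning the sole label iff the set is a singleton.
-- outside the precondition, e.g. on check_homogenous([['a'], ['b'], []]): A returns None, B raises IndexError
import Mathlib
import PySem

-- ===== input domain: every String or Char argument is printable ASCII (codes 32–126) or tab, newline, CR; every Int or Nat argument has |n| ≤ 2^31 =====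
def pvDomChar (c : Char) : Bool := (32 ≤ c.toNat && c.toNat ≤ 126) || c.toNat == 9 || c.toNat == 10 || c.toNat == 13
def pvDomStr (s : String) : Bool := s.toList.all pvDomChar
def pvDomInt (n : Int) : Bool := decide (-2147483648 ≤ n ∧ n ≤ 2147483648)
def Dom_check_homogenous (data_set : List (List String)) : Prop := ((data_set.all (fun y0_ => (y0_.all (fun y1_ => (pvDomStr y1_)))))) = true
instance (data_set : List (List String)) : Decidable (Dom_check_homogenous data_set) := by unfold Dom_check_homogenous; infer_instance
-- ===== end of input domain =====

-- B replaces A's running-reference early-exit scan by collecting the set of distinct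
-- first-column labels and branching on its cardinality (idiomatic; same cost).

-- ===== PORT A =====
-- the for-loop of A: compare each item[0] to homo, early return None on mismatch
def chkLoop (homo : String) : List (List String) → Option String
  | [] => some homo
  | item :: rest =>
    match PySem.List.pyGet? item 0 with
    | none => none          -- item[0] raises IndexError in Python; excluded by Pre_
    | some x => if x ≠ homo then none else chkLoop homo rest

def check_homogenous (data_set : List (List String)) : Option String :=
  if data_set.length = 0 then none
  else
    match PySem.List.pyGet? data_set 0 with
    | none => none
    | some row0 =>
      match PySem.List.pyGet? row0 0 with
      | none => none        -- data_set[0][0] raises IndexError; excluded by Pre_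
      | some homo => chkLoop homo data_set

-- ===== PORT B =====
def check_homogenous_alt (data_set : List (List String)) : Option String :=
  -- {row[0] for row in data_set}; rows are nonempty under Pre_ (empty rows are skipped
  -- by filterMap where Python would raise IndexError)
  let labels : PySem.Set String :=
    PySem.Set.ofList (data_set.filterMap (fun row => row.head?))
  match labels with
  | [l] => some l
  | _ => none

-- ===== PRECONDITION & SPEC =====
-- Pre_ excludes data sets containing an empty row: there A raises IndexError or, when a label
-- mismatch precedes the empty row, short-circuits to None, while B's set comprehension raises IndexError.
def Pre_check_homogenous (data_set : List (List String)) : Prop :=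
  ∀ row ∈ data_set, row ≠ []
instance (data_set : List (List String)) : Decidable (Pre_check_homogenous data_set) := by
  unfold Pre_check_homogenous; infer_instance

def pvWitness_check_homogenous : List (List String) := [["a", "x"], ["a"]]

def Spec_check_homogenous (data_set : List (List String)) (out : Option String) : Prop := out = check_homogenous_alt data_set
instance (data_set : List (List String)) (out : Option String) : Decidable (Spec_check_homogenous data_set out) := by unfold Spec_check_homogenous; infer_instance

-- ===== CLAIM (what is proved, stated in full; the proofs are below) =====
def Claim_equal_check_homogenous : Prop := ∀ (data_set : List (List String)), Dom_check_homogenous data_set → Pre_check_homogenous data_set → Spec_check_homogenous data_set (check_homogenous data_set)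

-- ===== LEMMAS AND PROOFS =====

-- A's loop computed in closed form
theorem chkLoop_eq (h : String) (ls : List (List String)) :
    chkLoop h ls =
      if ls.all (fun r => r.head? == some h) then some h else none := by
  induction ls with
  | nil => simp [chkLoop]
  | cons item rest ih =>
    cases item with
    | nil => simp [chkLoop, PySem.List.pyGet?, PySem.List.pyIdx?]
    | cons a tl =>
      have hget : PySem.List.pyGet? (a :: tl) 0 = some a := by
        simp [PySem.List.pyGet?, PySem.List.pyIdx?]
      simp only [chkLoop, hget, List.all_cons, List.head?_cons]
      by_cases hxh : a = h
      · subst hxh; simp [ih]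
      · simp [hxh]

-- Set.add only ever appends
theorem foldl_add_append (t : List String) (acc : PySem.Set String) :
    ∃ u, t.foldl PySem.Set.add acc = acc ++ u := by
  induction t generalizing acc with
  | nil => exact ⟨[], by simp⟩
  | cons x t ih =>
    simp only [List.foldl_cons]
    obtain ⟨u, hu⟩ := ih (PySem.Set.add acc x)
    have hadd : PySem.Set.add acc x = acc ∨ PySem.Set.add acc x = acc ++ [x] := by
      unfold PySem.Set.add; split <;> simp
    rcases hadd with h1 | h1
    · exact ⟨u, by rw [hu, h1]⟩
    · exact ⟨x :: u, by rw [hu, h1]; simp⟩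

theorem foldl_add_const (t : List String) (h : String)
    (hall : ∀ x ∈ t, x = h) : t.foldl PySem.Set.add [h] = [h] := by
  induction t with
  | nil => rfl
  | cons x t ih =>
    have hx : x = h := hall x (by simp)
    subst hx
    simp only [List.foldl_cons]
    have : PySem.Set.add [x] x = [x] := by
      simp [PySem.Set.add, PySem.Set.contains]
    rw [this]
    exact ih (fun y hy => hall y (by simp [hy]))

-- ===== VERDICT (by name: the statement is the Claim_ definition above) =====
theorem check_homogenous_spec : Claim_equal_check_homogenous := by
  intro ds _ hpre
  unfold Spec_check_homogenous check_homogenous check_homogenous_alt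
  cases ds with
  | nil => simp [PySem.Set.ofList]
  | cons r0 rest =>
    have hr0 : r0 ≠ [] := hpre r0 (by simp)
    obtain ⟨h, r0t, rfl⟩ : ∃ a t, r0 = a :: t := by
      cases r0 with
      | nil => exact absurd rfl hr0
      | cons a t => exact ⟨a, t, rfl⟩
    simp only [List.length_cons, PySem.List.pyGet?, PySem.List.pyIdx?]
    norm_num
    rw [chkLoop_eq]
    -- heads of the tail
    set t := rest.filterMap (fun row => row.head?) with ht
    have hmem : ∀ x, x ∈ t ↔ ∃ r ∈ rest, r.head? = some x := by
      intro x; simp [ht, List.mem_filterMap]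
    have hOf : PySem.Set.ofList (h :: t) = t.foldl PySem.Set.add [h] := by
      simp [PySem.Set.ofList, PySem.Set.add, PySem.Set.contains]
    have hfm : List.filterMap (fun row => row.head?) ((h :: r0t) :: rest) = h :: t := by
      simp [ht]
    rw [hfm]
    by_cases hall : ∀ x ∈ t, x = h
    · -- homogeneous: both sides return some h
      have hA : (((h :: r0t) :: rest : List (List String)).all
          (fun r => r.head? == some h)) = true := by
        simp only [List.all_cons, List.head?_cons, beq_self_eq_true, Bool.true_and,
          List.all_eq_true]
        intro r hr
        have hne : r ≠ [] := hpre r (by simp [hr])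
        obtain ⟨a, rt, rfl⟩ : ∃ a rt, r = a :: rt := by
          cases r with
          | nil => exact absurd rfl hne
          | cons a rt => exact ⟨a, rt, rfl⟩
        have : a ∈ t := (hmem a).2 ⟨a :: rt, hr, rfl⟩
        simp [hall a this]
      rw [hA]
      simp only [if_true]
      rw [hOf, foldl_add_const t h hall]
    · -- some differing head: A's all-check fails, B's set has ≥ 2 elements
      push Not at hall
      obtain ⟨x, hxt, hxh⟩ := hall
      have hA : (((h :: r0t) :: rest : List (List String)).all
          (fun r => r.head? == some h)) = false := by
        obtain ⟨r, hr, hhead⟩ := (hmem x).1 hxt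
        simp only [List.all_eq_false]
        exact ⟨r, by simp [hr], by simp [hhead, hxh]⟩
      rw [hA]
      rw [if_neg (by simp)]
      obtain ⟨u, hu⟩ := foldl_add_append t [h]
      rw [hOf, hu]
      have hxmem : x ∈ ([h] ++ u : List String) := by
        rw [← hu, ← hOf]
        have : x ∈ h :: t := by simp [hxt]
        simpa using (PySem.Set.mem_ofList (y := x) (xs := h :: t)).2 this
      have hune : u ≠ [] := by
        intro hnil
        rw [hnil] at hxmem
        exact hxh (by simpa using hxmem)
      cases u with
      | nil => exact absurd rfl hune
      | cons a b => rfl
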